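-- pv_equiv track=rewrite | github.com/pfarias29/sc_tp1_sdes | s_des.py | key_generation
-- ===== SOURCE A (Python) =====
-- def key_generation(key):
--
--     # Tranforma a chave em uma lista e reorganiza os bits
--     key = list(key)
--     first_permutation = [0 for i in range(10)]
--     P10 = [3, 5, 2, 7, 4, 10, 1, 9, 8, 6]
--
--     for i in range(10):
--         first_permutation[i] = key[P10[i] - 1]
--
--
--     # Separa a chave em duas partes e faz um deslocamento circular
--     first_half = first_permutation[:5]
--     second_half = first_permutation[5:]
--
--     first_half.append(first_half.pop(0))
--     second_half.append(second_half.pop(0))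
--
--     circular_shift = first_half + second_half
--
--     # Seleciona 8 bits e faz uma permutação
--     P8 = [6, 3, 7, 4, 8, 5, 10, 9]
--     K1 = [0 for _ in range(8)]
--     for i in range(8):
--         K1[i] = int(circular_shift[P8[i] - 1])
--
--     # Separa a chave em duas partes e faz um deslocamento circular duplo
--     first_half = circular_shift[:5]
--     second_half = circular_shift[5:]
--
--     for i in range(2):
--         first_half.append(first_half.pop(0))
--         second_half.append(second_half.pop(0))
--
--     circular_shift = first_half + second_half
--
--     # Seleciona 8 bits e faz uma permutação
--     K2 = [0 for i in range(8)]
--     for i in range(8):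
--         K2[i] = int(circular_shift[P8[i] - 1])
--
--     return K1, K2
-- ===== SOURCE B (Python) =====
-- # Fixed tables: where each subkey bit comes from in the original 10-bit key
-- # (P10, half-rotations and P8 composed symbolically once).
-- K1_IDX = [0, 6, 8, 3, 7, 2, 9, 5]
-- K2_IDX = [7, 2, 5, 4, 9, 1, 8, 0]
--
-- def key_generation(key):
--     key = list(key)
--     return [int(key[i]) for i in K1_IDX], [int(key[i]) for i in K2_IDX]
-- ===== Notes on version B (the rewrite author's own statement) =====
-- stated objective: simpler
-- what changed: The staged P10 permutation, half rotations and P8 selections are composed symbolically into two fixed 8-entry index tables, so each subkey is a single direct gather from the original key.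
import Mathlib
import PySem

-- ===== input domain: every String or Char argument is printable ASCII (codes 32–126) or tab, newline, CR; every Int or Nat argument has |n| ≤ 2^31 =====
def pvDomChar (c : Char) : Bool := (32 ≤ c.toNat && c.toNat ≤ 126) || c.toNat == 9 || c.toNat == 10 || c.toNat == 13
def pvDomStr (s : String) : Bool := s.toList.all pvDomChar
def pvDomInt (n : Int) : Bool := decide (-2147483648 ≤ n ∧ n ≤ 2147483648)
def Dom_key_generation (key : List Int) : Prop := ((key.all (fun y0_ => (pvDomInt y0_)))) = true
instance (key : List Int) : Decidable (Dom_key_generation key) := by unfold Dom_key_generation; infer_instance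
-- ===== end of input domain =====

-- B replaces A's staged P10/rotate/P8 pipeline by two direct gathers from the
-- original key through precomputed constant index tables (objective: simpler).

-- ===== PORT A =====
-- first_half.append(first_half.pop(0)): left-rotate by one (exact for nonempty lists; both halves have length 5 here)
def pvRotl1 (l : List Int) : List Int := l.drop 1 ++ l.take 1

def key_generation (key : List Int) : List Int × List Int :=
  -- for i in range(10): first_permutation[i] = key[P10[i]-1]
  let P10 : List Int := [3, 5, 2, 7, 4, 10, 1, 9, 8, 6]
  let first_permutation : List Int := P10.map (fun p => PySem.List.pyGetD key (p - 1) 0)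
  -- xs[:5] / xs[5:] with nonnegative bounds: take/drop is exact
  let first_half := first_permutation.take 5
  let second_half := first_permutation.drop 5
  let first_half := pvRotl1 first_half
  let second_half := pvRotl1 second_half
  let circular_shift := first_half ++ second_half
  let P8 : List Int := [6, 3, 7, 4, 8, 5, 10, 9]
  let K1 : List Int := P8.map (fun p => PySem.List.pyGetD circular_shift (p - 1) 0)
  let fh := circular_shift.take 5
  let sh := circular_shift.drop 5
  -- for i in range(2): rotate both halves
  let (fh, sh) := (List.range 2).foldl (fun (st : List Int × List Int) _ => (pvRotl1 st.1, pvRotl1 st.2)) (fh, sh)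
  let circular_shift2 := fh ++ sh
  let K2 : List Int := P8.map (fun p => PySem.List.pyGetD circular_shift2 (p - 1) 0)
  (K1, K2)

-- ===== PORT B =====
def K1_IDX : List Int := [0, 6, 8, 3, 7, 2, 9, 5]
def K2_IDX : List Int := [7, 2, 5, 4, 9, 1, 8, 0]

def key_generation_alt (key : List Int) : List Int × List Int :=
  (K1_IDX.map (fun i => PySem.List.pyGetD key i 0),
   K2_IDX.map (fun i => PySem.List.pyGetD key i 0))

-- ===== PRECONDITION & SPEC =====
-- A reads key[0]..key[9] and raises IndexError on keys shorter than 10 (B does too): excluded.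
-- Stated as both bounds: the largest index read (9) is in range, i.e. the length is at least 10.
def Pre_key_generation (key : List Int) : Prop := 9 < key.length ∧ 10 ≤ key.length
instance (key : List Int) : Decidable (Pre_key_generation key) := by unfold Pre_key_generation; infer_instance
def pvWitness_key_generation : List Int := [1, 0, 1, 0, 0, 0, 0, 0, 1, 0]

def Spec_key_generation (key : List Int) (out : List Int × List Int) : Prop := out = key_generation_alt key
instance (key : List Int) (out : List Int × List Int) : Decidable (Spec_key_generation key out) := by unfold Spec_key_generation; infer_instance

-- ===== CLAIM =====
def Claim_equal_key_generation : Prop := ∀ (key : List Int), Dom_key_generation key → Pre_key_generation key → Spec_key_generation key (key_generation key)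

-- ===== LEMMAS AND PROOFS =====

-- ===== VERDICT =====
theorem key_generation_spec : Claim_equal_key_generation := by
  intro key _ hpre
  unfold Pre_key_generation at hpre
  obtain ⟨-, hpre⟩ := hpre
  unfold Spec_key_generation
  rcases key with _ | ⟨a, _ | ⟨b, _ | ⟨c, _ | ⟨d, _ | ⟨e, _ | ⟨f, _ | ⟨g, _ | ⟨h, _ | ⟨i, _ | ⟨j, t⟩⟩⟩⟩⟩⟩⟩⟩⟩⟩ <;>
    simp only [List.length] at hpre <;> try omega
  simp [key_generation, key_generation_alt, K1_IDX, K2_IDX, pvRotl1, List.range_succ,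
        PySem.List.pyGetD_ofNat', List.getD]
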